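-- pv_equiv track=rewrite | github.com/maelstrom9/DS-and-Algorithms | EPI/Strings/6.11 sinsoidal string.py | sinsoid_string
-- ===== SOURCE A (Python) =====
-- def sinsoid_string(s):
--
--     res = []
--
--     i = 1
--     while i<len(s):
--         res.append(s[i])
--         i+=4
--     i = 0
--     while i<len(s):
--         res.append(s[i])
--         i+=2
--     i = 3
--     while i < len(s):
--         res.append(s[i])
--         i += 4
--
--
--     return "".join(res)
-- ===== SOURCE B (Python) =====
-- def sinsoid_string(s):
--     top, middle, bottom = [], [], []
--     for i, c in enumerate(s):
--         if i % 4 == 1: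
--             top.append(c)
--         elif i % 2 == 0:
--             middle.append(c)
--         elif i % 4 == 3:
--             bottom.append(c)
--     return "".join(top + middle + bottom)
-- ===== Notes on version B (the rewrite author's own statement) =====
-- stated objective: alternative
-- what changed: Replaces A's three separate strided while-loops over the string with a single enumerate pass that classifies each index into one of three bucket lists (i%4==1 / even / i%4==3) and joins the buckets.
import Mathlib
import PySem

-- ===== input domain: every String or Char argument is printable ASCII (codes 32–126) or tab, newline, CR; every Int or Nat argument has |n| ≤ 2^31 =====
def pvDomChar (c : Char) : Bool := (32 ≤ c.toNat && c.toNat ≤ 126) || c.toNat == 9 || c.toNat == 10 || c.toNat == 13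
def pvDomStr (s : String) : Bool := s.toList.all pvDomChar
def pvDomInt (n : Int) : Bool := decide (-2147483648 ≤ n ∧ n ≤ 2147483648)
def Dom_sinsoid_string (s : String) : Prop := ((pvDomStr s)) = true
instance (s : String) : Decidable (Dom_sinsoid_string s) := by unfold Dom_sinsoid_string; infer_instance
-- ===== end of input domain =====

-- B replaces A's three strided while-loops with a single enumerate pass bucketing each index into three lists; same O(n) cost, different decomposition.

-- ===== PORT A =====
-- 'while i < len(s): res.append(s[i]); i += 4' — stride-4 index loop
def pvLoop4 (l : List Char) (i : Nat) : List Char :=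
  if h : i < l.length then l[i] :: pvLoop4 l (i + 4) else []
termination_by l.length - i

-- 'while i < len(s): res.append(s[i]); i += 2' — stride-2 index loop
def pvLoop2 (l : List Char) (i : Nat) : List Char :=
  if h : i < l.length then l[i] :: pvLoop2 l (i + 2) else []
termination_by l.length - i

def sinsoid_string (s : String) : String :=
  String.mk (pvLoop4 s.toList 1 ++ pvLoop2 s.toList 0 ++ pvLoop4 s.toList 3)

-- ===== PORT B =====
def sinsoid_string_alt (s : String) : String :=
  let buckets :=
    (PySem.List.enumerate s.toList 0).foldl
      (fun (acc : List Char × List Char × List Char) (p : Int × Char) =>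
        if p.1 % 4 == 1 then (acc.1 ++ [p.2], acc.2.1, acc.2.2)
        else if p.1 % 2 == 0 then (acc.1, acc.2.1 ++ [p.2], acc.2.2)
        else if p.1 % 4 == 3 then (acc.1, acc.2.1, acc.2.2 ++ [p.2])
        else acc)
      ([], [], [])
  String.mk (buckets.1 ++ buckets.2.1 ++ buckets.2.2)

-- ===== PRECONDITION & SPEC =====
def Spec_sinsoid_string (s : String) (out : String) : Prop := out = sinsoid_string_alt s
instance (s : String) (out : String) : Decidable (Spec_sinsoid_string s out) := by unfold Spec_sinsoid_string; infer_instance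

-- ===== CLAIM (what is proved, stated in full; the proofs are below) =====
def Claim_equal_sinsoid_string : Prop := ∀ (s : String), Dom_sinsoid_string s → Spec_sinsoid_string s (sinsoid_string s)

-- ===== LEMMAS AND PROOFS =====

lemma pvLoop4_unfold (m : List Char) (j : Nat) :
    pvLoop4 m j = if h : j < m.length then m[j] :: pvLoop4 m (j + 4) else [] := by
  rw [pvLoop4]

lemma pvLoop2_unfold (m : List Char) (j : Nat) :
    pvLoop2 m j = if h : j < m.length then m[j] :: pvLoop2 m (j + 2) else [] := by
  rw [pvLoop2]

lemma pvLoop4_append (l : List Char) (c : Char) (i : Nat) :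
    pvLoop4 (l ++ [c]) i =
      pvLoop4 l i ++ (if i ≤ l.length ∧ (l.length - i) % 4 = 0 then [c] else []) := by
  suffices h : ∀ k i, l.length + 1 - i ≤ k → pvLoop4 (l ++ [c]) i =
      pvLoop4 l i ++ (if i ≤ l.length ∧ (l.length - i) % 4 = 0 then [c] else []) from
    h (l.length + 1 - i) i le_rfl
  intro k
  induction k with
  | zero =>
    intro i hi
    rw [pvLoop4_unfold (l ++ [c]) i, pvLoop4_unfold l i]
    have h1 : ¬ i < (l ++ [c]).length := by simp; omega
    have h2 : ¬ i < l.length := by omega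
    have h3 : ¬ (i ≤ l.length ∧ (l.length - i) % 4 = 0) := by omega
    rw [dif_neg h1, dif_neg h2, if_neg h3]
    rfl
  | succ k ih =>
    intro i hi
    rw [pvLoop4_unfold (l ++ [c]) i, pvLoop4_unfold l i]
    by_cases h1 : i < l.length
    · have h1' : i < (l ++ [c]).length := by simp; omega
      rw [dif_pos h1, dif_pos h1', List.getElem_append_left h1, ih (i + 4) (by omega)]
      by_cases hc : i + 4 ≤ l.length ∧ (l.length - (i + 4)) % 4 = 0
      · have hc' : i ≤ l.length ∧ (l.length - i) % 4 = 0 := by omega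
        simp [hc, hc']
      · have hc' : ¬ (i ≤ l.length ∧ (l.length - i) % 4 = 0) := by omega
        simp [hc, hc']
    · by_cases h2 : i = l.length
      · subst h2
        have h1' : l.length < (l ++ [c]).length := by simp
        rw [dif_pos h1', dif_neg h1, List.getElem_append_right (le_refl l.length)]
        rw [pvLoop4_unfold (l ++ [c]) (l.length + 4)]
        have h4 : ¬ l.length + 4 < (l ++ [c]).length := by simp
        rw [dif_neg h4, if_pos ⟨le_rfl, by simp⟩]
        simp
      · have h1' : ¬ i < (l ++ [c]).length := by simp; omega
        have h3 : ¬ (i ≤ l.length ∧ (l.length - i) % 4 = 0) := by omega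
        rw [dif_neg h1, dif_neg h1', if_neg h3]
        rfl

lemma pvLoop2_append (l : List Char) (c : Char) (i : Nat) :
    pvLoop2 (l ++ [c]) i =
      pvLoop2 l i ++ (if i ≤ l.length ∧ (l.length - i) % 2 = 0 then [c] else []) := by
  suffices h : ∀ k i, l.length + 1 - i ≤ k → pvLoop2 (l ++ [c]) i =
      pvLoop2 l i ++ (if i ≤ l.length ∧ (l.length - i) % 2 = 0 then [c] else []) from
    h (l.length + 1 - i) i le_rfl
  intro k
  induction k with
  | zero =>
    intro i hi
    rw [pvLoop2_unfold (l ++ [c]) i, pvLoop2_unfold l i]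
    have h1 : ¬ i < (l ++ [c]).length := by simp; omega
    have h2 : ¬ i < l.length := by omega
    have h3 : ¬ (i ≤ l.length ∧ (l.length - i) % 2 = 0) := by omega
    rw [dif_neg h1, dif_neg h2, if_neg h3]
    rfl
  | succ k ih =>
    intro i hi
    rw [pvLoop2_unfold (l ++ [c]) i, pvLoop2_unfold l i]
    by_cases h1 : i < l.length
    · have h1' : i < (l ++ [c]).length := by simp; omega
      rw [dif_pos h1, dif_pos h1', List.getElem_append_left h1, ih (i + 2) (by omega)]
      by_cases hc : i + 2 ≤ l.length ∧ (l.length - (i + 2)) % 2 = 0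
      · have hc' : i ≤ l.length ∧ (l.length - i) % 2 = 0 := by omega
        simp [hc, hc']
      · have hc' : ¬ (i ≤ l.length ∧ (l.length - i) % 2 = 0) := by omega
        simp [hc, hc']
    · by_cases h2 : i = l.length
      · subst h2
        have h1' : l.length < (l ++ [c]).length := by simp
        rw [dif_pos h1', dif_neg h1, List.getElem_append_right (le_refl l.length)]
        rw [pvLoop2_unfold (l ++ [c]) (l.length + 2)]
        have h4 : ¬ l.length + 2 < (l ++ [c]).length := by simp
        rw [dif_neg h4, if_pos ⟨le_rfl, by simp⟩]
        simp
      · have h1' : ¬ i < (l ++ [c]).length := by simp; omega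
        have h3 : ¬ (i ≤ l.length ∧ (l.length - i) % 2 = 0) := by omega
        rw [dif_neg h1, dif_neg h1', if_neg h3]
        rfl

lemma pvTop_eq (l : List Char) :
    pvLoop4 l 1 = ((PySem.List.enumerate l 0).filter (fun p => p.1 % 4 == 1)).map (·.2) := by
  induction l using List.reverseRecOn with
  | nil => rw [pvLoop4_unfold]; simp [PySem.List.enumerate_nil]
  | append_singleton l c ih =>
    rw [pvLoop4_append, PySem.List.enumerate_append, PySem.List.enumerate_cons,
      PySem.List.enumerate_nil]
    by_cases hc : 1 ≤ l.length ∧ (l.length - 1) % 4 = 0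
    · have hb : (l.length : Int) % 4 = 1 := by omega
      simp [ih, hc, hb]
    · have hb : ¬ (l.length : Int) % 4 = 1 := by omega
      simp [ih, hc, hb]

lemma pvMid_eq (l : List Char) :
    pvLoop2 l 0 = ((PySem.List.enumerate l 0).filter
      (fun p => !(p.1 % 4 == 1) && (p.1 % 2 == 0))).map (·.2) := by
  induction l using List.reverseRecOn with
  | nil => rw [pvLoop2_unfold]; simp [PySem.List.enumerate_nil]
  | append_singleton l c ih =>
    rw [pvLoop2_append, PySem.List.enumerate_append, PySem.List.enumerate_cons,
      PySem.List.enumerate_nil]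
    by_cases hc : (0 : Nat) ≤ l.length ∧ (l.length - 0) % 2 = 0
    · have hb1 : (l.length : Int) % 2 = 0 := by omega
      have hb2 : ¬ (l.length : Int) % 4 = 1 := by omega
      simp [ih, hb1, hb2, show l.length % 2 = 0 by omega]
    · have hb1 : ¬ (l.length : Int) % 2 = 0 := by omega
      simp [ih, hb1, show l.length % 2 = 1 by omega]

lemma pvBot_eq (l : List Char) :
    pvLoop4 l 3 = ((PySem.List.enumerate l 0).filter
      (fun p => !(p.1 % 4 == 1) && (!(p.1 % 2 == 0) && (p.1 % 4 == 3)))).map (·.2) := by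
  induction l using List.reverseRecOn with
  | nil => rw [pvLoop4_unfold]; simp [PySem.List.enumerate_nil]
  | append_singleton l c ih =>
    rw [pvLoop4_append, PySem.List.enumerate_append, PySem.List.enumerate_cons,
      PySem.List.enumerate_nil]
    by_cases hc : 3 ≤ l.length ∧ (l.length - 3) % 4 = 0
    · have hb1 : (l.length : Int) % 4 = 3 := by omega
      have hb2 : ¬ (l.length : Int) % 2 = 0 := by omega
      have hb3 : ¬ (l.length : Int) % 4 = 1 := by omega
      simp [ih, hc, hb1, hb2]
    · have hb1 : ¬ (l.length : Int) % 4 = 3 := by omega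
      simp [ih, hc, hb1]

-- ===== VERDICT (by name: the statement is the Claim_ definition above) =====
theorem sinsoid_string_spec : Claim_equal_sinsoid_string := by
  intro s _
  unfold Spec_sinsoid_string sinsoid_string sinsoid_string_alt
  have hfun :
      (fun (acc : List Char × List Char × List Char) (p : Int × Char) =>
        if p.1 % 4 == 1 then (acc.1 ++ [p.2], acc.2.1, acc.2.2)
        else if p.1 % 2 == 0 then (acc.1, acc.2.1 ++ [p.2], acc.2.2)
        else if p.1 % 4 == 3 then (acc.1, acc.2.1, acc.2.2 ++ [p.2])
        else acc) =
      (fun (acc : List Char × List Char × List Char) (p : Int × Char) =>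
        ((fun (a : List Char) (p : Int × Char) =>
            if p.1 % 4 == 1 then a ++ [p.2] else a) acc.1 p,
         (fun (mb : List Char × List Char) (p : Int × Char) =>
            ((fun (a : List Char) (p : Int × Char) =>
                if !(p.1 % 4 == 1) && (p.1 % 2 == 0) then a ++ [p.2] else a) mb.1 p,
             (fun (a : List Char) (p : Int × Char) =>
                if !(p.1 % 4 == 1) && (!(p.1 % 2 == 0) && (p.1 % 4 == 3)) then a ++ [p.2] else a) mb.2 p)) acc.2 p)) := by
    funext acc p
    by_cases h1 : (p.1 % 4 == 1 : Bool) = true <;>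
      by_cases h2 : (p.1 % 2 == 0 : Bool) = true <;>
        by_cases h3 : (p.1 % 4 == 3 : Bool) = true <;>
          simp [h1, h2, h3]
  rw [hfun, PySem.List.foldl_prod_mk
        (f := fun (a : List Char) (p : Int × Char) =>
          if p.1 % 4 == 1 then a ++ [p.2] else a)
        (g := fun (mb : List Char × List Char) (p : Int × Char) =>
          ((fun (a : List Char) (p : Int × Char) =>
              if !(p.1 % 4 == 1) && (p.1 % 2 == 0) then a ++ [p.2] else a) mb.1 p,
           (fun (a : List Char) (p : Int × Char) =>
              if !(p.1 % 4 == 1) && (!(p.1 % 2 == 0) && (p.1 % 4 == 3)) then a ++ [p.2] else a) mb.2 p)),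
      PySem.List.foldl_prod_mk
        (f := fun (a : List Char) (p : Int × Char) =>
          if !(p.1 % 4 == 1) && (p.1 % 2 == 0) then a ++ [p.2] else a)
        (g := fun (a : List Char) (p : Int × Char) =>
          if !(p.1 % 4 == 1) && (!(p.1 % 2 == 0) && (p.1 % 4 == 3)) then a ++ [p.2] else a)]
  simp only [PySem.List.foldl_append_if]
  rw [pvTop_eq, pvMid_eq, pvBot_eq]
  simp
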